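-- pv_equiv track=rewrite | github.com/Remusqs1/Esperanto-Al-Arkaikam | funkcioj.py | Adjektivo
-- ===== SOURCE A (Python) =====
-- def Adjektivo(matrico):
--     for i in range(len(matrico)):
--         index=matrico.index(matrico[i])
--         if matrico[i][-1]=="a":
--             Vortom=(matrico[i]+"m")
--             matrico.remove(matrico[i])
--             matrico.insert(index, Vortom)
--         elif matrico[i][-2:]=="aj": #Same sed ne plurale
--             matrico[i]=matrico[i][:-1]
--             Vortoy=(matrico[i]+"y")
--             matrico.remove(matrico[i])
--             matrico.insert(index, Vortoy)
--     return (matrico)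
-- ===== SOURCE B (Python) =====
-- def _arkaika(vorto):
--     if vorto.endswith("a"):
--         return vorto + "m"
--     if vorto.endswith("aj"):
--         return vorto[:-2] + "ay"
--     return vorto
--
-- def Adjektivo(matrico):
--     matrico[:] = [_arkaika(v) for v in matrico]
--     return matrico
-- ===== Notes on version B (the rewrite author's own statement) =====
-- stated objective: faster
-- what changed: B replaces A's per-element index/remove/insert list surgery (each a linear scan) with a single pointwise map over the list, rebuilding it in one pass; A's index bookkeeping is provably the identity when no element is empty.
import Mathlib
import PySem

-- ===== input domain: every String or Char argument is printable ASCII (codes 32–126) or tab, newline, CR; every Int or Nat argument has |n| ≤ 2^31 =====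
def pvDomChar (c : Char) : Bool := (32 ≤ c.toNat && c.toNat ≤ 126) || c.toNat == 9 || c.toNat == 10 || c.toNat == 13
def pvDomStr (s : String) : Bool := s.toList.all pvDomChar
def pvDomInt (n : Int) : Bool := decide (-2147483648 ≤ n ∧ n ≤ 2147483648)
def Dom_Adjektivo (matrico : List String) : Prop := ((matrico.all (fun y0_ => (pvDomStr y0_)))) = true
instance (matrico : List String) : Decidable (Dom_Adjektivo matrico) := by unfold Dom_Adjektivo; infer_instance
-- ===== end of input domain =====

-- B replaces A's per-element index/remove/insert list surgery with a single pointwise map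
-- (objective: faster, O(n) vs O(n^2)); A mutates its argument in place — B performs the same
-- in-place update in Python; the equivalence proved here is about the return value.


-- ===== PORT A =====
-- one iteration of A's loop body (i comes from range(len(matrico)), so 0 ≤ i < len;
-- List.set at i.toNat is exact for 'matrico[i] = …' there)
def AdjStep (m : List String) (i : Int) : List String :=
  let w := (PySem.List.pyGet? m i).getD ""                     -- matrico[i]
  let index := ((PySem.List.index? m w).getD 0 : Nat)          -- matrico.index(matrico[i])
  if PySem.Str.pyGet? w (-1) = some 'a' then                   -- matrico[i][-1] == "a"
    let vortom := w ++ "m"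
    let m1 := (PySem.List.remove? m w).getD m                  -- matrico.remove(matrico[i])
    PySem.List.insert m1 (index : Int) vortom                  -- matrico.insert(index, Vortom)
  else if PySem.Str.slice w (some (-2)) none = "aj" then       -- matrico[i][-2:] == "aj"
    let w' := PySem.Str.slice w none (some (-1))               -- matrico[i][:-1]
    let m1 := m.set i.toNat w'                                 -- matrico[i] = matrico[i][:-1]
    let vortoy := w' ++ "y"                                    -- Vortoy = matrico[i] + "y"
    let m2 := (PySem.List.remove? m1 w').getD m1               -- matrico.remove(matrico[i])
    PySem.List.insert m2 (index : Int) vortoy                  -- matrico.insert(index, Vortoy)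
  else m

def Adjektivo (matrico : List String) : List String :=
  (PySem.List.pyRange 0 (matrico.length : Int)).foldl AdjStep matrico

-- ===== PORT B =====
def arkaika (vorto : String) : String :=
  if PySem.Str.endswith vorto "a" then vorto ++ "m"
  else if PySem.Str.endswith vorto "aj" then PySem.Str.slice vorto none (some (-2)) ++ "ay"
  else vorto

def Adjektivo_alt (matrico : List String) : List String := matrico.map arkaika

-- ===== PRECONDITION & SPEC =====
-- A evaluates matrico[i][-1], an IndexError on an empty string, so Pre_ excludes lists containing "".
def Pre_Adjektivo (matrico : List String) : Prop := "" ∉ matrico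
instance (matrico : List String) : Decidable (Pre_Adjektivo matrico) := by unfold Pre_Adjektivo; infer_instance
def pvWitness_Adjektivo : List String := (["bela", "belaj", "domo"])

def Spec_Adjektivo (matrico : List String) (out : List String) : Prop := out = Adjektivo_alt matrico
instance (matrico : List String) (out : List String) : Decidable (Spec_Adjektivo matrico out) := by unfold Spec_Adjektivo; infer_instance

-- ===== CLAIM (what is proved, stated in full; the proofs are below) =====
def Claim_equal_Adjektivo : Prop := ∀ (matrico : List String), Dom_Adjektivo matrico → Pre_Adjektivo matrico → Spec_Adjektivo matrico (Adjektivo matrico)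

-- ===== LEMMAS AND PROOFS =====

-- endswith by a single character is a condition on the last character
theorem endswith_single_iff (s : String) (c : Char) :
    PySem.Str.endswith s (String.ofList [c]) = true ↔ s.toList.getLast? = some c := by
  rw [PySem.Str.endswith_eq, PySem.Chars.endswith_iff]
  constructor
  · rintro ⟨t, ht⟩
    simp only [String.toList_ofList] at ht
    rw [← ht]; simp
  · intro h
    obtain ⟨t, ht⟩ := List.getLast?_eq_some_iff.mp h
    exact ⟨t, by simp [ht.symm]⟩

-- the output of arkaika never ends in 'a'
theorem arkaika_last_ne_a (x : String) : (arkaika x).toList.getLast? ≠ some 'a' := by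
  unfold arkaika
  split_ifs with h1 h2
  · simp
  · simp
  · intro hc
    exact h1 ((endswith_single_iff x 'a').mpr hc)

-- the output of arkaika never ends in "aj"
theorem arkaika_not_endswith_aj (x : String) : ¬ ['a','j'] <:+ (arkaika x).toList := by
  unfold arkaika
  split_ifs with h1 h2
  · rintro ⟨t, ht⟩
    have := congrArg List.getLast? ht
    simp [show ("m" : String).toList = ['m'] by decide] at this
  · rintro ⟨t, ht⟩
    have := congrArg List.getLast? ht
    simp [show ("ay" : String).toList = ['a','y'] by decide] at this
  · intro hc
    rw [PySem.Str.endswith_eq] at h2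
    exact h2 ((PySem.Chars.endswith_iff _ _).mpr hc)

-- remove? deletes the first occurrence; with v absent from the prefix that is the marked cell
theorem remove?_append_not_mem {α : Type} [DecidableEq α] (pre : List α) (v : α) (suf : List α)
    (h : v ∉ pre) : PySem.List.remove? (pre ++ v :: suf) v = some (pre ++ suf) := by
  induction pre with
  | nil => simp
  | cons x t ih =>
    have hx : x ≠ v := by intro e; exact h (by simp [e])
    have ht : v ∉ t := fun hm => h (List.mem_cons_of_mem _ hm)
    rw [List.cons_append, PySem.List.remove?_cons_of_ne _ hx, ih ht]
    rfl

-- first occurrence index of the marked cell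
theorem index?_append_not_mem {α : Type} [DecidableEq α] (pre : List α) (v : α) (suf : List α)
    (h : v ∉ pre) : PySem.List.index? (pre ++ v :: suf) v = some pre.length :=
  (PySem.List.index?_eq_some_iff _ _ _).mpr ⟨pre, suf, rfl, rfl, h⟩

theorem insert_append {α : Type} (pre : List α) (suf : List α) (v : α) :
    PySem.List.insert (pre ++ suf) ((pre.length : Nat) : Int) v = pre ++ v :: suf := by
  rw [PySem.List.insert_natCast _ _ _ (by simp)]
  simp

theorem set_append {α : Type} (pre : List α) (w : α) (suf : List α) (v : α) :
    (pre ++ w :: suf).set pre.length v = pre ++ v :: suf := by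
  rw [List.set_append_right _ _ (le_refl _)]
  simp

-- ONE ITERATION: with the prefix already rewritten by arkaika, A's step rewrites exactly cell i
theorem adjStep_eq (pre : List String) (w : String) (suf : List String) :
    AdjStep (pre.map arkaika ++ w :: suf) ((pre.length : Nat) : Int)
      = pre.map arkaika ++ arkaika w :: suf := by
  have hget : PySem.List.pyGet? (pre.map arkaika ++ w :: suf) ((pre.length : Nat) : Int)
      = some w := by
    have h := PySem.List.pyGet?_append_length (pre := pre.map arkaika) (y := w) (ys := suf)
    simp only [List.length_map] at h
    exact h
  unfold AdjStep
  rw [hget]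
  simp only [Option.getD_some]
  by_cases hA : w.toList.getLast? = some 'a'
  · -- branch "a"
    have hcond : PySem.Str.pyGet? w (-1) = some 'a' := by
      simp [PySem.List.pyGet?_neg_one, hA]
    rw [if_pos hcond]
    have hnm : w ∉ pre.map arkaika := by
      intro hm
      obtain ⟨x, _, hx⟩ := List.mem_map.mp hm
      exact arkaika_last_ne_a x (hx ▸ hA)
    rw [index?_append_not_mem _ _ _ hnm, remove?_append_not_mem _ _ _ hnm]
    simp only [Option.getD_some]
    have := insert_append (pre.map arkaika) suf (w ++ "m")
    simp only [List.length_map] at this ⊢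
    rw [this]
    have harw : arkaika w = w ++ "m" := by
      unfold arkaika
      rw [if_pos ((endswith_single_iff w 'a').mpr hA)]
    rw [harw]
  · by_cases hAJ : ['a','j'] <:+ w.toList
    · -- branch "aj"
      obtain ⟨t, ht⟩ := hAJ
      have hlast : w.toList.getLast? = some 'j' := by rw [← ht]; simp
      have hcondA : ¬ PySem.Str.pyGet? w (-1) = some 'a' := by
        simp [PySem.List.pyGet?_neg_one, hlast]
      rw [if_neg hcondA]
      have hslice : PySem.Str.slice w (some (-2)) none = "aj" := by
        have : (PySem.Str.slice w (some (-2)) none).toList = ['a','j'] := by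
          rw [PySem.Str.toList_slice, PySem.Chars.slice_eq_listSlice,
              PySem.List.slice_from_neg_ofNat _ 2 (by omega), ← ht]
          simp
        exact String.toList_inj.mp (by rw [this]; decide)
      rw [if_pos hslice]
      have hnm : w ∉ pre.map arkaika := by
        intro hm
        obtain ⟨x, _, hx⟩ := List.mem_map.mp hm
        exact arkaika_not_endswith_aj x (by rw [hx]; exact ⟨t, ht⟩)
      rw [index?_append_not_mem _ _ _ hnm]
      simp only [Option.getD_some, Int.toNat_natCast]
      set w' := PySem.Str.slice w none (some (-1)) with hw'
      have hw'l : w'.toList = t ++ ['a'] := by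
        rw [hw', PySem.Str.toList_slice, PySem.Chars.slice_eq_listSlice,
            PySem.List.slice_to_neg_one, ← ht]
        simp
      have hw'last : w'.toList.getLast? = some 'a' := by rw [hw'l]; simp
      have hset : (pre.map arkaika ++ w :: suf).set (pre.map arkaika).length w'
          = pre.map arkaika ++ w' :: suf := set_append _ _ _ _
      simp only [List.length_map] at hset
      rw [hset]
      have hnm' : w' ∉ pre.map arkaika := by
        intro hm
        obtain ⟨x, _, hx⟩ := List.mem_map.mp hm
        exact arkaika_last_ne_a x (hx ▸ hw'last)
      rw [remove?_append_not_mem _ _ _ hnm']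
      simp only [Option.getD_some]
      have := insert_append (pre.map arkaika) suf (w' ++ "y")
      simp only [List.length_map] at this ⊢
      rw [this]
      have harw : arkaika w = w' ++ "y" := by
        unfold arkaika
        rw [if_neg, if_pos]
        · -- slice w none (some (-2)) ++ "ay" = w' ++ "y"
          have h1 : (PySem.Str.slice w none (some (-2))).toList = t := by
            rw [PySem.Str.toList_slice, PySem.Chars.slice_eq_listSlice,
                PySem.List.slice_to_neg_ofNat _ 2 (by omega), ← ht]
            simp
          apply String.toList_inj.mp
          simp [h1, hw'l]
        · rw [PySem.Str.endswith_eq]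
          exact (PySem.Chars.endswith_iff _ _).mpr ⟨t, ht⟩
        · intro hc
          exact hA ((endswith_single_iff w 'a').mp hc)
      rw [harw]
    · -- unchanged
      have hcondA : ¬ PySem.Str.pyGet? w (-1) = some 'a' := by
        simp [PySem.List.pyGet?_neg_one, hA]
      rw [if_neg hcondA]
      have hslice : ¬ PySem.Str.slice w (some (-2)) none = "aj" := by
        intro hs
        apply hAJ
        have : (PySem.Str.slice w (some (-2)) none).toList = ['a','j'] := by
          rw [hs]; rfl
        rw [PySem.Str.toList_slice, PySem.Chars.slice_eq_listSlice,
            PySem.List.slice_from_neg_ofNat _ 2 (by omega)] at this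
        exact this ▸ List.drop_suffix _ _
      rw [if_neg hslice]
      have harw : arkaika w = w := by
        unfold arkaika
        rw [if_neg, if_neg]
        · rw [PySem.Str.endswith_eq]
          intro hc
          exact hAJ ((PySem.Chars.endswith_iff _ _).mp hc)
        · intro hc
          exact hA ((endswith_single_iff w 'a').mp hc)
      rw [harw]

-- THE LOOP: folding A's step over the remaining indices maps arkaika over the suffix
theorem adj_loop (suf : List String) : ∀ (pre : List String),
    (PySem.List.pyRange ((pre.length : Nat) : Int) (((pre.length + suf.length : Nat) : Nat) : Int) 1).foldl
      AdjStep (pre.map arkaika ++ suf) = (pre ++ suf).map arkaika := by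
  induction suf with
  | nil =>
    intro pre
    rw [show PySem.List.pyRange _ _ = [] by
      simp [PySem.List.pyRange]]
    simp
  | cons w suf ih =>
    intro pre
    rw [PySem.List.pyRange_one_cons (by simp only [List.length_cons]; push_cast; omega)]
    rw [List.foldl_cons, adjStep_eq pre w suf]
    have hstep : pre.map arkaika ++ arkaika w :: suf = (pre ++ [w]).map arkaika ++ suf := by
      simp
    rw [hstep]
    have := ih (pre ++ [w])
    simp only [List.length_append, List.length_singleton] at this
    have harr : ((pre.length : Nat) : Int) + 1 = (((pre.length + 1 : Nat) : Nat) : Int) := by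
      push_cast; ring
    rw [harr]
    rw [show pre.length + (w :: suf).length = pre.length + 1 + suf.length by simp; omega]
    rw [this]
    simp

-- ===== VERDICT (by name: the statement is the Claim_ definition above) =====
theorem Adjektivo_spec : Claim_equal_Adjektivo := by
  intro matrico _ _
  unfold Spec_Adjektivo Adjektivo Adjektivo_alt
  have h := adj_loop matrico []
  simpa using h
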